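-- pv_equiv track=rewrite | github.com/fennzar/bridge-orchestration | tools/zephyr-cli/zephyr_cli/formatting.py | format_daemon_info
-- ===== SOURCE A (Python) =====
-- def format_daemon_info(info):
--     """Format daemon get_info response as readable key-value pairs."""
--     # Show most useful fields in a sensible order
--     priority_keys = [
--         'height', 'target_height', 'difficulty', 'synchronized',
--         'tx_count', 'tx_pool_size', 'white_peerlist_size', 'grey_peerlist_size',
--         'incoming_connections_count', 'outgoing_connections_count',
--         'version', 'nettype', 'top_block_hash',
--     ]
--     lines = []
--     shown = set()
--     for key in priority_keys:
--         if key in info: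
--             lines.append(f'  {key}: {info[key]}')
--             shown.add(key)
--     for key in sorted(info.keys()):
--         if key not in shown and key != 'status':
--             lines.append(f'  {key}: {info[key]}')
--     return '\n'.join(lines)
-- ===== SOURCE B (Python) =====
-- def format_daemon_info(info):
--     """Format daemon get_info response as readable key-value pairs."""
--     priority_keys = [
--         'height', 'target_height', 'difficulty', 'synchronized',
--         'tx_count', 'tx_pool_size', 'white_peerlist_size', 'grey_peerlist_size',
--         'incoming_connections_count', 'outgoing_connections_count',
--         'version', 'nettype', 'top_block_hash',
--     ]
--     rank = {k: i for i, k in enumerate(priority_keys)}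
--     big = len(priority_keys)
--     keys = sorted((k for k in info if k != 'status'),
--                   key=lambda k: (rank.get(k, big), '' if k in rank else k))
--     return '\n'.join(f'  {k}: {info[k]}' for k in keys)
-- ===== Notes on version B (the rewrite author's own statement) =====
-- stated objective: alternative
-- what changed: Replaces A's two-phase construction (a loop over priority_keys building lines plus a 'shown' set, then a loop over sorted keys skipping shown ones) by a single sort of all non-'status' keys under a composite (rank, tiebreak) key taken from a precomputed index table.
import Mathlib
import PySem

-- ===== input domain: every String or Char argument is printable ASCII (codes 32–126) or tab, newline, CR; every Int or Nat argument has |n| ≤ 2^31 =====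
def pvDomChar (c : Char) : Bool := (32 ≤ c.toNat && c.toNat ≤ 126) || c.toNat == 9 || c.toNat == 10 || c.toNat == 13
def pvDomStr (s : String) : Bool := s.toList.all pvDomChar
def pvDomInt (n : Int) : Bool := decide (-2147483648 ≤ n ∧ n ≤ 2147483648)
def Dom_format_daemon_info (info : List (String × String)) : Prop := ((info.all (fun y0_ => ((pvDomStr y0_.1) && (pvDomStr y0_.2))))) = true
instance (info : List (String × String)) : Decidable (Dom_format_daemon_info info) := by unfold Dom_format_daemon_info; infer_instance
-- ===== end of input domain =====

-- B replaces A's priority-loop-plus-second-sorted-pass by one single sort of all non-'status' keys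
-- under a composite (rank, tiebreak) key built from an index table (objective: alternative decomposition).


-- shared literal data: the priority-key list both Python sources contain verbatim,
-- and the f-string '  {key}: {value}' both sources use
def pvPriorityKeys : List String :=
  ["height", "target_height", "difficulty", "synchronized",
   "tx_count", "tx_pool_size", "white_peerlist_size", "grey_peerlist_size",
   "incoming_connections_count", "outgoing_connections_count",
   "version", "nettype", "top_block_hash"]

def pvLine (k v : String) : String := "  " ++ k ++ ": " ++ v

-- ===== PORT A =====
-- two passes: a loop over priority_keys collecting lines and the 'shown' set,
-- then a loop over sorted(info.keys()) skipping shown keys and 'status'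
def format_daemon_info (info : List (String × String)) : String :=
  let d := PySem.Dict.ofList info
  let st := pvPriorityKeys.foldl
    (fun (st : List String × PySem.Set String) key =>
      if d.contains key then (st.1 ++ [pvLine key (d.getD key "")], st.2.add key) else st)
    ([], PySem.Set.ofList [])
  let lines := (PySem.List.sorted d.keys (fun k => k)).foldl
    (fun acc key =>
      if !(decide (key ∈ st.2)) && key != "status" then acc ++ [pvLine key (d.getD key "")]
      else acc)
    st.1
  PySem.Str.join "\n" lines

-- ===== PORT B =====
-- rank = {k: i for i, k in enumerate(priority_keys)}  (a constant of the module)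
def pvRank : PySem.Dict String Int :=
  (PySem.List.enumerate pvPriorityKeys).foldl
    (fun (r : PySem.Dict String Int) p => r.insert p.2 p.1) PySem.Dict.empty

-- big = len(priority_keys)
def pvBig : Int := PySem.List.len pvPriorityKeys

def format_daemon_info_alt (info : List (String × String)) : String :=
  let d := PySem.Dict.ofList info
  let keys := PySem.List.sorted2 (d.keys.filter (fun k => k != "status"))
    (fun k => pvRank.getD k pvBig)
    (fun k => if pvRank.contains k then "" else k)
  PySem.Str.join "\n" (keys.map (fun k => pvLine k (d.getD k "")))

-- ===== PRECONDITION & SPEC =====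
def Spec_format_daemon_info (info : List (String × String)) (out : String) : Prop := out = format_daemon_info_alt info
instance (info : List (String × String)) (out : String) : Decidable (Spec_format_daemon_info info out) := by unfold Spec_format_daemon_info; infer_instance

-- ===== CLAIM (what is proved, stated in full; the proofs are below) =====
def Claim_equal_format_daemon_info : Prop := ∀ (info : List (String × String)), Dom_format_daemon_info info → Spec_format_daemon_info info (format_daemon_info info)

-- ===== LEMMAS AND PROOFS =====

-- the composite sort key of B, as a lexicographic pair
def pvKey (k : String) : Lex (Int × String) :=
  toLex (pvRank.getD k pvBig, if pvRank.contains k then "" else k)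

-- sorted2 (tuple key) is sorted under the lexicographic pair order
theorem pv_sorted2_eq_sorted_toLex {α κ₁ κ₂ : Type} [LinearOrder κ₁] [LinearOrder κ₂]
    (xs : List α) (k1 : α → κ₁) (k2 : α → κ₂) :
    PySem.List.sorted2 xs k1 k2 = PySem.List.sorted xs (fun a => toLex (k1 a, k2 a)) := by
  rw [PySem.List.sorted_eq_foldl_insertBy]
  unfold PySem.List.sorted2
  simp only [if_neg (by simp : ¬ (false = true))]
  congr 1
  funext acc x
  congr 1
  funext a b
  have hiff : (toLex (k1 a, k2 a) < toLex (k1 b, k2 b)) ↔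
      (k1 a < k1 b ∨ (¬ (k1 b < k1 a) ∧ k2 a < k2 b)) := by
    rw [Prod.Lex.lt_iff]
    simp only [ofLex_toLex]
    constructor
    · rintro (h | ⟨he, h2⟩)
      · exact Or.inl h
      · exact Or.inr ⟨by simp [he], h2⟩
    · rintro (h | ⟨hn, h2⟩)
      · exact Or.inl h
      · rcases (not_lt.mp hn).lt_or_eq with h | h
        · exact Or.inl h
        · exact Or.inr ⟨h, h2⟩
  have hb : (!decide (k1 b < k1 a)) = decide (k1 a ≤ k1 b) := by
    rw [← decide_not]; exact decide_eq_decide.mpr not_lt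
  simp [hiff, hb]

-- the step function of A's first loop
def pvStepA (d : PySem.Dict String String) (st : List String × PySem.Set String) (key : String) :
    List String × PySem.Set String :=
  if d.contains key then (st.1 ++ [pvLine key (d.getD key "")], st.2.add key) else st

theorem pv_loop1_fst (d : PySem.Dict String String) (ks : List String)
    (st : List String × PySem.Set String) :
    (ks.foldl (pvStepA d) st).1 =
      st.1 ++ (ks.filter (fun k => d.contains k)).map (fun k => pvLine k (d.getD k "")) := by
  induction ks generalizing st with
  | nil => simp
  | cons k ks ih =>
    simp only [List.foldl_cons, List.filter_cons]
    by_cases h : d.contains k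
    · simp [pvStepA, h, ih]
    · simp [pvStepA, h, ih]

theorem pv_loop1_snd (d : PySem.Dict String String) (ks : List String)
    (st : List String × PySem.Set String) (x : String) :
    x ∈ (ks.foldl (pvStepA d) st).2 ↔ x ∈ st.2 ∨ (x ∈ ks ∧ d.contains x) := by
  induction ks generalizing st with
  | nil => simp
  | cons k ks ih =>
    simp only [List.foldl_cons]
    by_cases h : d.contains k
    · rw [show pvStepA d st k = (st.1 ++ [pvLine k (d.getD k "")], st.2.add k) by
        simp [pvStepA, h]]
      rw [ih]
      simp only [PySem.Set.mem_add, List.mem_cons]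
      by_cases hx : x = k
      · subst hx; tauto
      · tauto
    · rw [show pvStepA d st k = st by simp [pvStepA, h]]
      rw [ih]
      simp only [List.mem_cons]
      by_cases hx : x = k
      · subst hx; tauto
      · tauto

-- concrete facts about the rank table
theorem pv_rank_keys : pvRank.keys = pvPriorityKeys := by decide
theorem pv_rank_lt_pairwise :
    List.Pairwise (fun a b => pvRank.getD a pvBig < pvRank.getD b pvBig) pvPriorityKeys := by decide
theorem pv_rank_lt_big : ∀ k ∈ pvPriorityKeys, pvRank.getD k pvBig < pvBig := by decide
theorem pv_prio_nodup : pvPriorityKeys.Nodup := by decide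
theorem pv_status_not_prio : "status" ∉ pvPriorityKeys := by decide

theorem pv_rank_contains (k : String) : pvRank.contains k = true ↔ k ∈ pvPriorityKeys := by
  rw [PySem.Dict.contains_iff_mem_keys, pv_rank_keys]

theorem pv_rank_getD_of_not_mem {k : String} (h : k ∉ pvPriorityKeys) :
    pvRank.getD k pvBig = pvBig := by
  apply PySem.Dict.getD_of_not_contains
  rw [Bool.eq_false_iff]
  intro hc
  exact h ((pv_rank_contains k).mp hc)

-- the ordered key list of B equals A's priority-then-alphabetical key list
theorem pv_keys_eq (d : PySem.Dict String String) (hnd : d.keys.Nodup) :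
    PySem.List.sorted2 (d.keys.filter (fun k => k != "status"))
      (fun k => pvRank.getD k pvBig) (fun k => if pvRank.contains k then "" else k) =
    pvPriorityKeys.filter (fun k => d.contains k) ++
      (PySem.List.sorted d.keys (fun k => k)).filter
        (fun k => !(decide (k ∈ pvPriorityKeys ∧ d.contains k = true)) && k != "status") := by
  rw [pv_sorted2_eq_sorted_toLex]
  set key : String → Lex (Int × String) :=
    fun k => toLex (pvRank.getD k pvBig, if pvRank.contains k then "" else k) with hkey
  set P := pvPriorityKeys.filter (fun k => d.contains k) with hP
  set S := (PySem.List.sorted d.keys (fun k => k)).filter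
      (fun k => !(decide (k ∈ pvPriorityKeys ∧ d.contains k = true)) && k != "status") with hS
  have hPmem : ∀ x, x ∈ P ↔ x ∈ pvPriorityKeys ∧ x ∈ d.keys := by
    intro x
    rw [hP]
    simp [List.mem_filter, PySem.Dict.contains_iff_mem_keys]
  have hSmem : ∀ x, x ∈ S ↔ x ∈ d.keys ∧ x ∉ pvPriorityKeys ∧ x ≠ "status" := by
    intro x
    simp only [hS, List.mem_filter, PySem.List.mem_sorted, Bool.and_eq_true, Bool.not_eq_true',
      decide_eq_false_iff_not, bne_iff_ne]
    constructor
    · rintro ⟨hk, hn, hs⟩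
      exact ⟨hk, fun hp => hn ⟨hp, (PySem.Dict.contains_iff_mem_keys d x).mpr hk⟩, hs⟩
    · rintro ⟨hk, hn, hs⟩
      exact ⟨hk, fun h => hn h.1, hs⟩
  have hkey_of_rank : ∀ {a b : String},
      pvRank.getD a pvBig < pvRank.getD b pvBig → key a < key b := by
    intro a b h
    exact Prod.Lex.lt_iff.mpr (Or.inl h)
  have hSnodup : S.Nodup := List.Nodup.filter _ (((PySem.List.sorted_perm d.keys (fun k => k) false).nodup_iff).mpr hnd)
  have hPnodup : P.Nodup := List.Nodup.filter _ pv_prio_nodup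
  apply PySem.List.sorted_eq_of_perm_of_pairwise_lt
  · -- permutation
    rw [List.perm_ext_iff_of_nodup _ ((List.Nodup.filter _ hnd))]
    · intro a
      simp only [List.mem_append, hPmem, hSmem, List.mem_filter, bne_iff_ne]
      constructor
      · rintro (⟨hp, hk⟩ | ⟨hk, _, hs⟩)
        · exact ⟨hk, fun he => pv_status_not_prio (he ▸ hp)⟩
        · exact ⟨hk, hs⟩
      · rintro ⟨hk, hs⟩
        by_cases hp : a ∈ pvPriorityKeys
        · exact Or.inl ⟨hp, hk⟩
        · exact Or.inr ⟨hk, hp, hs⟩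
    · exact List.Nodup.append hPnodup hSnodup
        (fun a haP haS => ((hSmem a).mp haS).2.1 ((hPmem a).mp haP).1)
  · -- pairwise strictly increasing keys
    rw [List.pairwise_append]
    refine ⟨?_, ?_, ?_⟩
    · exact (List.Pairwise.sublist List.filter_sublist pv_rank_lt_pairwise).imp hkey_of_rank
    · have h1 := PySem.List.sorted_pairwise d.keys (fun k => k)
      have h2 : (PySem.List.sorted d.keys (fun k => k)).Pairwise (· ≠ ·) :=
        ((PySem.List.sorted_perm d.keys (fun k => k) false).nodup_iff).mpr hnd
      have h3 : (PySem.List.sorted d.keys (fun k => k)).Pairwise (· < ·) :=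
        (h1.and h2).imp (fun h => lt_of_le_of_ne h.1 h.2)
      refine (List.Pairwise.sublist List.filter_sublist h3).imp_of_mem ?_
      intro a b ha hb hab
      have hna : a ∉ pvPriorityKeys := ((hSmem a).mp ha).2.1
      have hnb : b ∉ pvPriorityKeys := ((hSmem b).mp hb).2.1
      have hca : pvRank.contains a = false :=
        Bool.eq_false_iff.mpr (fun h => hna ((pv_rank_contains a).mp h))
      have hcb : pvRank.contains b = false :=
        Bool.eq_false_iff.mpr (fun h => hnb ((pv_rank_contains b).mp h))
      refine Prod.Lex.lt_iff.mpr (Or.inr ⟨?_, ?_⟩)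
      · show pvRank.getD a pvBig = pvRank.getD b pvBig
        rw [pv_rank_getD_of_not_mem hna, pv_rank_getD_of_not_mem hnb]
      · show (if pvRank.contains a then "" else a) < (if pvRank.contains b then "" else b)
        simp only [hca, hcb, Bool.false_eq_true, if_false]
        exact hab
    · intro a ha b hb
      have hpa : a ∈ pvPriorityKeys := ((hPmem a).mp ha).1
      have hnb : b ∉ pvPriorityKeys := ((hSmem b).mp hb).2.1
      exact hkey_of_rank (by
        rw [pv_rank_getD_of_not_mem hnb]
        exact pv_rank_lt_big a hpa)

-- main equivalence
theorem pv_main (info : List (String × String)) :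
    format_daemon_info info = format_daemon_info_alt info := by
  simp only [format_daemon_info, format_daemon_info_alt]
  set d := PySem.Dict.ofList info with hd
  have hnd : d.keys.Nodup := PySem.Dict.nodup_keys_ofList info
  rw [show (fun (st : List String × PySem.Set String) key =>
      if d.contains key then (st.1 ++ [pvLine key (d.getD key "")], st.2.add key) else st) =
      pvStepA d from rfl]
  set st := pvPriorityKeys.foldl (pvStepA d) ([], PySem.Set.ofList []) with hst
  rw [PySem.List.foldl_append_if
      (fun key => !(decide (key ∈ st.2)) && key != "status")
      (fun key => pvLine key (d.getD key ""))]
  have hfilter : (PySem.List.sorted d.keys (fun k => k)).filter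
        (fun key => !(decide (key ∈ st.2)) && key != "status") =
      (PySem.List.sorted d.keys (fun k => k)).filter
        (fun k => !(decide (k ∈ pvPriorityKeys ∧ d.contains k = true)) && k != "status") := by
    apply List.filter_congr
    intro x _
    have : x ∈ st.2 ↔ (x ∈ pvPriorityKeys ∧ d.contains x = true) := by
      rw [hst, pv_loop1_snd]
      simp
    rw [decide_eq_decide.mpr this]
  have hfst : st.1 = (pvPriorityKeys.filter (fun k => d.contains k)).map
      (fun k => pvLine k (d.getD k "")) := by
    rw [hst, pv_loop1_fst]
    rfl
  rw [hfilter, hfst, pv_keys_eq d hnd, List.map_append]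

-- ===== VERDICT (by name: the statement is the Claim_ definition above) =====
theorem format_daemon_info_spec : Claim_equal_format_daemon_info := by
  intro info _
  show format_daemon_info info = format_daemon_info_alt info
  exact pv_main info
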